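-- pv_equiv track=rewrite | github.com/AllenEdgarPoe/SD_symphony | extensions/shift-attention/scripts/img2txt2img2.py | get_prompt_from_texts
-- ===== SOURCE A (Python) =====
-- def get_prompt_from_texts(texts, add_prompt):
--     # if add_prompt:
--     #     texts = [self.prompt_generator(txt) for txt in texts if txt]
--     # else:
--     texts = [txt for txt in texts if txt]
--
--     for idx, text in enumerate(texts):
--         if text:
--             if idx==0:
--                 texts[idx]+=':1~0 AND '
--             elif idx==len(texts)-1:
--                 texts[idx] = texts[idx] + ":0~1"
--             else:
--                 texts[idx] = texts[idx] + ":0~1 THEN " + texts[idx] + ":1~0 AND "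
--
--     return ''.join(texts)
-- ===== SOURCE B (Python) =====
-- def get_prompt_from_texts(texts, add_prompt):
--     ts = [t for t in texts if t]
--     if len(ts) <= 1:
--         return ts[0] if ts else ""
--     segments = [f"{x}:1~0 AND {y}:0~1" for x, y in zip(ts, ts[1:])]
--     return " THEN ".join(segments)
-- ===== Notes on version B (the rewrite author's own statement) =====
-- stated objective: simpler
-- what changed: Instead of an index loop that rewrites each element in place with three positional cases, B builds one segment per consecutive pair via zip and joins the segments with ' THEN '.
-- intended difference: On inputs whose non-empty texts number exactly one, A returns the text with a dangling 'text:1~0 AND ' (the first-index branch shadows the last-index branch), while B returns the text itself, the intended prompt for a single text. — e.g. on get_prompt_from_texts(["a"], false): A returns "a:1~0 AND ", B returns "a"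
import Mathlib
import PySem

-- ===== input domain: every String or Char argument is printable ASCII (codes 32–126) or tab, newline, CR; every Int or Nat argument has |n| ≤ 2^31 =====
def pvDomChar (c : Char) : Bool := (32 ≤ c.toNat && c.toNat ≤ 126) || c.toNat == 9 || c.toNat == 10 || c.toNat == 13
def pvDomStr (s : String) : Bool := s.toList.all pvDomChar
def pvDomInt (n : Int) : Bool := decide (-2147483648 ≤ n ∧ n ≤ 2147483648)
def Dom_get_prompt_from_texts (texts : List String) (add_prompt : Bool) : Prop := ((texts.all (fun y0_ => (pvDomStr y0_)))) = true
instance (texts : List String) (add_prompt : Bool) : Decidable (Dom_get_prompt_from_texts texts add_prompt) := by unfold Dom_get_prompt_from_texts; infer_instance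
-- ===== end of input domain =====

-- B replaces A's in-place index loop (three positional cases per element) with one segment per
-- consecutive pair of non-empty texts joined by " THEN " (objective: simpler); on exactly one
-- non-empty text A's first-index branch leaves a dangling ":1~0 AND ", B returns the text itself.


-- ===== PORT A =====
-- the Python for-loop mutates texts[idx] in place; each iteration reads only the still-unmodified
-- element at its own index, so it is ported as a rebuild threading the running index
def pvLoopA (n : Nat) (idx : Nat) : List String → List String
  | [] => []
  | text :: rest =>
    (if text ≠ "" then
       if idx = 0 then text ++ ":1~0 AND "
       else if idx = n - 1 then text ++ ":0~1"
       else text ++ ":0~1 THEN " ++ text ++ ":1~0 AND "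
     else text) :: pvLoopA n (idx + 1) rest

def get_prompt_from_texts (texts : List String) (add_prompt : Bool) : String :=
  let ts := texts.filter (fun t => t ≠ "")
  PySem.Str.join "" (pvLoopA ts.length 0 ts)

-- ===== PORT B =====
def pvSeg (p : String × String) : String := p.1 ++ ":1~0 AND " ++ p.2 ++ ":0~1"

def get_prompt_from_texts_alt (texts : List String) (add_prompt : Bool) : String :=
  let ts := texts.filter (fun t => t ≠ "")
  if ts.length ≤ 1 then (match ts with | [] => "" | t :: _ => t)
  else PySem.Str.join " THEN " ((ts.zip ts.tail).map pvSeg)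

-- ===== PRECONDITION & SPEC =====
-- On inputs with exactly one non-empty text A returns 'text:1~0 AND ' (the idx==0 branch shadows
-- the last-index branch, leaving a dangling AND); B returns the text itself, the intended prompt
-- for a single text.
def D_get_prompt_from_texts (texts : List String) (add_prompt : Bool) : Prop :=
  texts.count "" + 1 = texts.length
instance (texts : List String) (add_prompt : Bool) : Decidable (D_get_prompt_from_texts texts add_prompt) := by unfold D_get_prompt_from_texts; infer_instance

def Spec_get_prompt_from_texts (texts : List String) (add_prompt : Bool) (out : String) : Prop := ¬ D_get_prompt_from_texts texts add_prompt → out = get_prompt_from_texts_alt texts add_prompt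
instance (texts : List String) (add_prompt : Bool) (out : String) : Decidable (Spec_get_prompt_from_texts texts add_prompt out) := by unfold Spec_get_prompt_from_texts; infer_instance

def pvDiffWitness_get_prompt_from_texts : List String × Bool := (["a"], false)
def pvDiffWitnessOut_get_prompt_from_texts : String × String := ("a:1~0 AND ", "a")

-- ===== CLAIM (what is proved, stated in full; the proofs are below) =====
def Claim_unchanged_get_prompt_from_texts : Prop := ∀ (texts : List String) (add_prompt : Bool), Dom_get_prompt_from_texts texts add_prompt → Spec_get_prompt_from_texts texts add_prompt (get_prompt_from_texts texts add_prompt)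
def Claim_changed_get_prompt_from_texts : Prop := Dom_get_prompt_from_texts (pvDiffWitness_get_prompt_from_texts.1) (pvDiffWitness_get_prompt_from_texts.2) ∧ D_get_prompt_from_texts (pvDiffWitness_get_prompt_from_texts.1) (pvDiffWitness_get_prompt_from_texts.2) ∧ get_prompt_from_texts (pvDiffWitness_get_prompt_from_texts.1) (pvDiffWitness_get_prompt_from_texts.2) = pvDiffWitnessOut_get_prompt_from_texts.1 ∧ get_prompt_from_texts_alt (pvDiffWitness_get_prompt_from_texts.1) (pvDiffWitness_get_prompt_from_texts.2) = pvDiffWitnessOut_get_prompt_from_texts.2 ∧ pvDiffWitnessOut_get_prompt_from_texts.1 ≠ pvDiffWitnessOut_get_prompt_from_texts.2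
def Claim_exact_get_prompt_from_texts : Prop := ∀ (texts : List String) (add_prompt : Bool), Dom_get_prompt_from_texts texts add_prompt → D_get_prompt_from_texts texts add_prompt → get_prompt_from_texts texts add_prompt ≠ get_prompt_from_texts_alt texts add_prompt

-- ===== LEMMAS AND PROOFS =====

theorem pvCount_add_filter (texts : List String) :
    texts.count "" + (texts.filter (fun t => t ≠ "")).length = texts.length := by
  induction texts with
  | nil => simp
  | cons a l ih =>
    rw [List.count_cons, List.filter_cons]
    by_cases ha : a = ""
    · rw [if_pos (by simp [ha]), if_neg (by simp [ha])]
      simp only [List.length_cons]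
      omega
    · rw [if_neg (by simp [ha]), if_pos (by simp [ha])]
      simp only [List.length_cons]
      omega

theorem pvJoin_cons_cons (s a b : String) (l : List String) :
    PySem.Str.join s (a :: b :: l) = a ++ s ++ PySem.Str.join s (b :: l) := by
  simp only [PySem.Str.join, List.map, PySem.Chars.join_cons_cons]
  simp [String.append_assoc]

theorem pvJoin_singleton (s a : String) : PySem.Str.join s [a] = a := by
  simp [PySem.Str.join, PySem.Chars.join_singleton]

theorem pvJoin_nil (s : String) : PySem.Str.join s [] = "" := by
  simp [PySem.Str.join, PySem.Chars.join_nil]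

theorem pvJoinA_cons (a : String) (l : List String) :
    PySem.Str.join "" (a :: l) = a ++ PySem.Str.join "" l := by
  cases l with
  | nil => simp [pvJoin_singleton, pvJoin_nil]
  | cons b l' => rw [pvJoin_cons_cons]; simp

theorem pvLit : (":0~1 THEN " : String) = ":0~1" ++ " THEN " := by decide

-- tail of A's loop (idx ≥ 1): joined, it is the tail of B's " THEN "-joined segments
theorem pvLoopA_tail_join (r : List String) : ∀ (y : String) (idx : Nat), 1 ≤ idx →
    y ≠ "" → (∀ t ∈ r, t ≠ "") →
    PySem.Str.join "" (pvLoopA (idx + r.length + 1) idx (y :: r)) =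
      (match r with
       | [] => y ++ ":0~1"
       | _ :: _ => y ++ ":0~1 THEN " ++
           PySem.Str.join " THEN " (((y :: r).zip r).map pvSeg)) := by
  induction r with
  | nil =>
    intro y idx hidx hy _
    have hidx0 : idx ≠ 0 := by omega
    simp [pvLoopA, hidx0, hy, pvJoin_singleton]
  | cons z r ih =>
    intro y idx hidx hy hall
    have hz : z ≠ "" := hall z (by simp)
    have hall' : ∀ t ∈ r, t ≠ "" := fun t ht => hall t (by simp [ht])
    have hrec := ih z (idx + 1) (by omega) hz hall'
    have hidx0 : idx ≠ 0 := by omega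
    have harg : idx + 1 + r.length + 1 = idx + (z :: r).length + 1 := by simp; omega
    rw [show pvLoopA (idx + (z :: r).length + 1) idx (y :: z :: r) =
        (y ++ ":0~1 THEN " ++ y ++ ":1~0 AND ") :: pvLoopA (idx + (z :: r).length + 1) (idx + 1) (z :: r) from by
      simp [pvLoopA, hy, hidx0]]
    rw [← harg, pvJoinA_cons, hrec]
    cases r with
    | nil =>
      simp [pvSeg, pvJoin_singleton, String.append_assoc]
    | cons w r' =>
      simp only [List.zip, List.zipWith, List.map, pvJoin_cons_cons]
      simp [pvSeg, pvLit, String.append_assoc]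

-- on a filtered list of ≥ 2 non-empty texts, A's join equals B's " THEN "-join of segments
theorem main_join (x y : String) (r : List String)
    (hx : x ≠ "") (hy : y ≠ "") (hall : ∀ t ∈ r, t ≠ "") :
    PySem.Str.join "" (pvLoopA (x :: y :: r).length 0 (x :: y :: r)) =
      PySem.Str.join " THEN " (((x :: y :: r).zip (y :: r)).map pvSeg) := by
  have h1 : (x :: y :: r).length = 1 + r.length + 1 := by simp; omega
  rw [show pvLoopA (x :: y :: r).length 0 (x :: y :: r) =
      (x ++ ":1~0 AND ") :: pvLoopA (1 + r.length + 1) 1 (y :: r) from by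
    rw [h1]; simp [pvLoopA, hx]]
  rw [pvJoinA_cons, pvLoopA_tail_join r y 1 (by omega) hy hall]
  cases r with
  | nil => simp [pvSeg, pvJoin_singleton, String.append_assoc]
  | cons z r' =>
    simp only [List.zip, List.zipWith, List.map, pvJoin_cons_cons]
    simp [pvSeg, pvLit, String.append_assoc]

-- ===== VERDICT (by name: the statement is the Claim_ definition above) =====
theorem get_prompt_from_texts_spec : Claim_unchanged_get_prompt_from_texts := by
  intro texts add_prompt _ hD
  unfold get_prompt_from_texts get_prompt_from_texts_alt
  simp only
  have hall : ∀ t ∈ texts.filter (fun t => t ≠ ""), t ≠ "" := by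
    intro t ht
    have := List.of_mem_filter ht
    simpa using this
  cases hts : texts.filter (fun t => t ≠ "") with
  | nil => simp [pvLoopA, pvJoin_nil]
  | cons x rest =>
    cases rest with
    | nil =>
      refine absurd ?_ hD
      unfold D_get_prompt_from_texts
      have hsum := pvCount_add_filter texts
      rw [hts] at hsum
      simpa using hsum
    | cons y r =>
      rw [hts] at hall
      have h2 : ¬ (x :: y :: r).length ≤ 1 := by simp
      rw [if_neg h2]
      simpa using main_join x y r (hall x (by simp)) (hall y (by simp))
        (fun t ht => hall t (by simp [ht]))

theorem get_prompt_from_texts_changed : Claim_changed_get_prompt_from_texts := by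
  unfold Claim_changed_get_prompt_from_texts; decide

theorem get_prompt_from_texts_tight : Claim_exact_get_prompt_from_texts := by
  intro texts add_prompt _ hD
  unfold D_get_prompt_from_texts at hD
  have hflen : (texts.filter (fun t => t ≠ "")).length = 1 := by
    have hsum := pvCount_add_filter texts
    omega
  unfold get_prompt_from_texts get_prompt_from_texts_alt
  simp only
  cases hts : texts.filter (fun t => t ≠ "") with
  | nil => rw [hts] at hflen; simp at hflen
  | cons x rest =>
    cases rest with
    | cons y r => rw [hts] at hflen; simp at hflen
    | nil =>
      have hx : x ≠ "" := by
        have := List.of_mem_filter (l := texts) (p := fun t => t ≠ "") (a := x) (by rw [hts]; simp)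
        simpa using this
      simp [pvLoopA, pvJoin_singleton, hx]
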